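-- pv_equiv track=rewrite | github.com/Grant734/ars-legendi | server/scripts/caesar_pipeline/tag_constructions.py | has_result_correlative
-- ===== SOURCE A (Python) =====
-- def tok_text(tok):
--     return (tok.get("text") or "").strip()
--
-- def tok_lemma(tok):
--     return (tok.get("lemma") or "").strip()
--
-- RESULT_CORRELATIVES = {
--     # common “so / such / so great” result markers
--     "tam", "ita", "sic", "tantus", "talis", "tot", "adeo",
--
--     # optional: Caesar sometimes uses these in result-ish ways
--     # keep if you want broader recall
--     "eo", "usque"
-- }
--
-- def has_result_correlative(tokens, marker_i):
--     """
--     Returns (True, correlative_index) if we see a correlative result marker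
--     in the same strong-punct segment as the ut/uti marker, before it.
--     Otherwise (False, None).
--
--     Uses your segment_bounds() and tok_text/tok_lemma helpers.
--     """
--     seg_start, _ = segment_bounds(tokens, marker_i)
--
--     best = None
--     for j in range(seg_start, marker_i):
--         t = tok_text(tokens[j]).lower()
--         lem = tok_lemma(tokens[j]).lower()
--         if t in RESULT_CORRELATIVES or lem in RESULT_CORRELATIVES:
--             best = j  # keep last one before ut/uti
--     return (best is not None), best
--
-- STRONG_PUNCT = {".", ";", ":", "?", "!"}
--
-- def is_strong_boundary(tok):
--     # UD tends to store punctuation tokens as text=";" etc.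
--     if tok.get("upos") == "PUNCT":
--         return tok_text(tok) in STRONG_PUNCT
--     return False
--
-- def segment_bounds(tokens, i):
--     """
--     Returns (seg_start, seg_end) for the 'segment' containing index i,
--     where segments are separated by strong punctuation (. ; : ? !).
--     """
--     n = len(tokens)
--     left = i
--     while left > 0:
--         if is_strong_boundary(tokens[left - 1]):
--             break
--         left -= 1
--
--     right = i
--     while right < n - 1:
--         if is_strong_boundary(tokens[right + 1]):
--             break
--         right += 1
--
--     return left, right
-- ===== SOURCE B (Python) =====
-- RESULT_CORRELATIVES = {
--     "tam", "ita", "sic", "tantus", "talis", "tot", "adeo",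
--     "eo", "usque"
-- }
--
-- STRONG_PUNCT = {".", ";", ":", "?", "!"}
--
-- def tok_text(tok):
--     return (tok.get("text") or "").strip()
--
-- def tok_lemma(tok):
--     return (tok.get("lemma") or "").strip()
--
-- def is_strong_boundary(tok):
--     if tok.get("upos") == "PUNCT":
--         return tok_text(tok) in STRONG_PUNCT
--     return False
--
-- def has_result_correlative(tokens, marker_i):
--     """Two staged passes, no segment_bounds: (1) the segment start is one past
--     the last strong boundary in the prefix before the marker; (2) collect every
--     correlative index in the segment and answer with the last one."""
--     seg_start = 0
--     for idx, tok in enumerate(tokens[:marker_i]):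
--         if is_strong_boundary(tok):
--             seg_start = idx + 1
--     hits = [j for j in range(seg_start, marker_i)
--             if tok_text(tokens[j]).lower() in RESULT_CORRELATIVES
--             or tok_lemma(tokens[j]).lower() in RESULT_CORRELATIVES]
--     if hits:
--         return (True, hits[-1])
--     return (False, None)
-- ===== Notes on version B (the rewrite author's own statement) =====
-- stated objective: alternative
-- what changed: B drops segment_bounds entirely (A computes an unused right bound with a downward while-loop): it finds the segment start by a forward enumerate pass over the prefix slice tokens[:marker_i] keeping one-past-the-last strong boundary, then builds the full list of correlative indices in the segment with a comprehension and answers with hits[-1] — staged passes over different data (token slice + hits list) instead of A's index while-loops and last-match accumulator.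
import Mathlib
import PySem

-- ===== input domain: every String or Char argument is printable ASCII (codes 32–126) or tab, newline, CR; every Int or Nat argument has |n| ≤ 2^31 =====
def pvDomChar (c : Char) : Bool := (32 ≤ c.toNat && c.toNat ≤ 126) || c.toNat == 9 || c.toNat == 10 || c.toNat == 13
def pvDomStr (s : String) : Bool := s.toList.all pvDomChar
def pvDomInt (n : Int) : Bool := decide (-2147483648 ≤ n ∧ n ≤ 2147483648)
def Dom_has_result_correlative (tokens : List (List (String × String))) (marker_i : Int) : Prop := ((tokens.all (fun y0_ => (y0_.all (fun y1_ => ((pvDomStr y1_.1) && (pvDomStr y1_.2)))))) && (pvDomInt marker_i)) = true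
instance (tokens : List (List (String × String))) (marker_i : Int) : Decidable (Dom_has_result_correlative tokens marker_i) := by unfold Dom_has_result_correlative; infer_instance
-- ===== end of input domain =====

-- B avoids segment_bounds (whose right bound A never uses): a forward enumerate pass over
-- the prefix slice finds the segment start, a comprehension collects all hits, answer = hits[-1].

-- ===== PORT A =====
-- shared helpers: tok_text / tok_lemma / is_strong_boundary and the membership test,
-- identical in both Python sources (dict lookup = first match, List.lookup)
def pvTokText (tok : List (String × String)) : String :=
  PySem.Str.strip ((List.lookup "text" tok).getD "")

def pvTokLemma (tok : List (String × String)) : String :=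
  PySem.Str.strip ((List.lookup "lemma" tok).getD "")

def pvResultCorrelatives : List String :=
  ["tam", "ita", "sic", "tantus", "talis", "tot", "adeo", "eo", "usque"]

def pvStrongPunct : List String := [".", ";", ":", "?", "!"]

def pvIsStrongBoundary (tok : List (String × String)) : Bool :=
  if List.lookup "upos" tok == some "PUNCT" then pvStrongPunct.contains (pvTokText tok)
  else false

-- the loop-body test: `tok_text(tokens[j]).lower() in RC or tok_lemma(tokens[j]).lower() in RC`
def pvTokMatches (tokens : List (List (String × String))) (j : Int) : Bool :=
  let tok := PySem.List.pyGetD tokens j []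
  pvResultCorrelatives.contains (PySem.Str.lower (pvTokText tok)) ||
  pvResultCorrelatives.contains (PySem.Str.lower (pvTokLemma tok))

-- `while left > 0: if is_strong_boundary(tokens[left-1]): break; left -= 1` (entered only when i > 0)
def pvSegLeft (tokens : List (List (String × String))) : Nat → Nat
  | 0 => 0
  | l+1 => if pvIsStrongBoundary (PySem.List.pyGetD tokens (l : Int) []) then l+1
           else pvSegLeft tokens l

-- `while right < n-1: if is_strong_boundary(tokens[right+1]): break; right += 1` (fuel ≥ remaining steps)
def pvSegRight (tokens : List (List (String × String))) (n : Int) : Nat → Int → Int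
  | 0, r => r
  | f+1, r =>
    if r < n - 1 then
      if pvIsStrongBoundary (PySem.List.pyGetD tokens (r+1) []) then r
      else pvSegRight tokens n f (r+1)
    else r

def pvSegmentBounds (tokens : List (List (String × String))) (i : Int) : Int × Int :=
  let n : Int := tokens.length
  let left : Int := if i ≤ 0 then i else (pvSegLeft tokens i.toNat : Int)
  let right : Int := pvSegRight tokens n (n - 1 - i).toNat i
  (left, right)

def has_result_correlative (tokens : List (List (String × String))) (marker_i : Int) : Bool × Option Int :=
  let seg_start := (pvSegmentBounds tokens marker_i).1
  let best : Option Int :=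
    (PySem.List.pyRange seg_start marker_i 1).foldl
      (fun best j => if pvTokMatches tokens j then some j else best) none
  (best.isSome, best)

-- ===== PORT B =====
-- pass 1: `for idx, tok in enumerate(tokens[:marker_i]): if is_strong_boundary(tok): seg_start = idx + 1`
def pvSegStart (tokens : List (List (String × String))) (marker_i : Int) : Int :=
  (PySem.List.enumerate (PySem.List.slice tokens none (some marker_i)) 0).foldl
    (fun seg p => if pvIsStrongBoundary p.2 then p.1 + 1 else seg) 0

-- pass 2: the hits comprehension, then `(True, hits[-1])` or `(False, None)`
def has_result_correlative_alt (tokens : List (List (String × String))) (marker_i : Int) : Bool × Option Int :=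
  let seg_start := pvSegStart tokens marker_i
  let hits := (PySem.List.pyRange seg_start marker_i 1).filter (fun j => pvTokMatches tokens j)
  if hits.isEmpty then (false, none)
  else (true, PySem.List.pyGet? hits (-1))

-- ===== PRECONDITION & SPEC =====
-- Pre_ excludes exactly the inputs where A's segment_bounds raises IndexError
-- (tokens[left-1] / tokens[right+1] out of range, negative wraparound included).
def Pre_has_result_correlative (tokens : List (List (String × String))) (marker_i : Int) : Prop :=
  -((tokens.length : Int) + 1) ≤ marker_i ∧ marker_i ≤ (tokens.length : Int)
instance (tokens : List (List (String × String))) (marker_i : Int) : Decidable (Pre_has_result_correlative tokens marker_i) := by unfold Pre_has_result_correlative; infer_instance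

def pvWitness_has_result_correlative : (List (List (String × String))) × Int :=
  ([[("text", "tam")], [("text", "ut")]], 1)

def Spec_has_result_correlative (tokens : List (List (String × String))) (marker_i : Int) (out : Bool × Option Int) : Prop := out = has_result_correlative_alt tokens marker_i
instance (tokens : List (List (String × String))) (marker_i : Int) (out : Bool × Option Int) : Decidable (Spec_has_result_correlative tokens marker_i out) := by unfold Spec_has_result_correlative; infer_instance

-- ===== CLAIM (what is proved, stated in full; the proofs are below) =====
def Claim_equal_has_result_correlative : Prop := ∀ (tokens : List (List (String × String))) (marker_i : Int), Dom_has_result_correlative tokens marker_i → Pre_has_result_correlative tokens marker_i → Spec_has_result_correlative tokens marker_i (has_result_correlative tokens marker_i)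

-- ===== LEMMAS AND PROOFS =====

-- A's last-match fold over a list = last element of the filtered list (or the initial acc)
lemma foldl_last_match (p : Int → Bool) :
    ∀ (xs : List Int) (acc : Option Int),
      xs.foldl (fun b j => if p j then some j else b) acc = ((xs.filter p).getLast?).or acc := by
  intro xs
  induction xs with
  | nil => intro acc; simp
  | cons x xs ih =>
    intro acc
    simp only [List.foldl_cons, List.filter_cons]
    by_cases hp : p x
    · simp only [hp, if_true]
      rw [ih]
      cases h : (xs.filter p).getLast? with
      | none => simp [List.getLast?_cons, h]
      | some j => simp [List.getLast?_cons, h]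
    · simp [hp, ih]

-- B's pass-1 fold never goes below its (nonnegative) accumulator start
lemma segStart_fold_nonneg (l : List (List (String × String))) :
    ∀ (s acc : Int), 0 ≤ s → 0 ≤ acc →
      0 ≤ (PySem.List.enumerate l s).foldl
            (fun seg p => if pvIsStrongBoundary p.2 then p.1 + 1 else seg) acc := by
  induction l with
  | nil => intro s acc _ h; simpa [PySem.List.enumerate_nil]
  | cons x l ih =>
    intro s acc hs hacc
    rw [PySem.List.enumerate_cons, List.foldl_cons]
    exact ih (s+1) _ (by omega) (by split_ifs <;> omega)

-- B's pass-1 over the k-prefix computes exactly A's left bound pvSegLeft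
lemma segStart_eq_segLeft (tokens : List (List (String × String))) :
    ∀ (k : Nat), k ≤ tokens.length →
      (PySem.List.enumerate (tokens.take k) 0).foldl
        (fun seg p => if pvIsStrongBoundary p.2 then p.1 + 1 else seg) 0
      = (pvSegLeft tokens k : Int) := by
  intro k
  induction k with
  | zero => intro _; simp [pvSegLeft, PySem.List.enumerate_nil]
  | succ k ih =>
    intro hk
    have hklt : k < tokens.length := by omega
    have htake : tokens.take (k+1) = tokens.take k ++ [tokens[k]] := by
      rw [List.take_add_one]; simp [List.getElem?_eq_getElem hklt]
    rw [htake, PySem.List.enumerate_append, List.foldl_append]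
    have hlen : ((tokens.take k).length : Int) = (k : Int) := by
      simp [List.length_take, Nat.min_eq_left (le_of_lt hklt)]
    rw [PySem.List.enumerate_cons, PySem.List.enumerate_nil]
    simp only [List.foldl_cons, List.foldl_nil, hlen]
    have hget : PySem.List.pyGetD tokens (k : Int) ([] : List (String × String)) = tokens[k] := by
      simp [PySem.List.pyGetD_natCast, List.getD_eq_getElem?_getD, List.getElem?_eq_getElem hklt]
    rw [pvSegLeft, hget]
    by_cases hb : pvIsStrongBoundary tokens[k]
    · simp [hb]
    · simp [hb, ih (le_of_lt hklt)]

-- ===== VERDICT (by name: the statement is the Claim_ definition above) =====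
theorem has_result_correlative_spec : Claim_equal_has_result_correlative := by
  intro tokens marker_i _ hpre
  unfold Pre_has_result_correlative at hpre
  unfold Spec_has_result_correlative
  simp only [has_result_correlative, has_result_correlative_alt]
  by_cases hneg : marker_i ≤ 0
  · -- both ranges are empty: A's seg_start = marker_i, B's seg_start ≥ 0 ≥ marker_i
    have hA : (pvSegmentBounds tokens marker_i).1 = marker_i := by
      simp [pvSegmentBounds, hneg]
    have hBnn : 0 ≤ pvSegStart tokens marker_i := by
      unfold pvSegStart
      exact segStart_fold_nonneg _ 0 0 le_rfl le_rfl
    rw [hA, PySem.List.pyRange_one_eq_nil le_rfl,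
        PySem.List.pyRange_one_eq_nil (by omega : marker_i ≤ pvSegStart tokens marker_i)]
    simp
  · -- 0 < marker_i ≤ len tokens: the two segment starts coincide, then fold-last = filter-last
    rw [not_le] at hneg
    have hle : marker_i.toNat ≤ tokens.length := by omega
    have hslice : PySem.List.slice tokens none (some marker_i) = tokens.take marker_i.toNat :=
      PySem.List.slice_to tokens (by omega)
    have hseg : pvSegStart tokens marker_i = (pvSegLeft tokens marker_i.toNat : Int) := by
      unfold pvSegStart
      rw [hslice]
      exact segStart_eq_segLeft tokens _ hle
    have hA : (pvSegmentBounds tokens marker_i).1 = (pvSegLeft tokens marker_i.toNat : Int) := by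
      simp only [pvSegmentBounds]
      rw [if_neg (by omega)]
    rw [hA, hseg, foldl_last_match]
    set hits := ((PySem.List.pyRange (pvSegLeft tokens marker_i.toNat : Int) marker_i 1).filter
      (fun j => pvTokMatches tokens j)) with hhits
    cases h : hits with
    | nil => simp
    | cons y ys =>
      simp [PySem.List.pyGet?_neg_one, List.getLast?_cons]
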